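-- pv_equiv track=rewrite | github.com/Anubhab-1/insight-ai-hackathon | backend/main.py | choose_preferred_dimension
-- ===== SOURCE A (Python) =====
-- from typing import List, Optional, Dict, Any, Tuple, Callable, cast
--
-- def choose_preferred_dimension(categorical_columns: List[str]) -> str:
--     priority_tokens = [
--         "region",
--         "category",
--         "segment",
--         "product",
--         "channel",
--         "language",
--         "country",
--         "market",
--         "campaign",
--         "status",
--     ]
--     excluded_tokens = ["_id", "title"]
--
--     preferred_pool = [
--         column for column in categorical_columns
--         if not any(token in column.lower() for token in excluded_tokens)
--     ] or categorical_columns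
--
--     for token in priority_tokens:
--         for column in preferred_pool:
--             if token in column.lower():
--                 return column
--
--     return preferred_pool[0] if preferred_pool else "segment"
-- ===== SOURCE B (Python) =====
-- def choose_preferred_dimension(categorical_columns):
--     priority_tokens = [
--         "region", "category", "segment", "product", "channel",
--         "language", "country", "market", "campaign", "status",
--     ]
--     excluded_tokens = ["_id", "title"]
--
--     pool = [
--         column for column in categorical_columns
--         if not any(token in column.lower() for token in excluded_tokens)
--     ] or categorical_columns
--
--     if not pool:
--         return "segment"
--
--     def rank(column):
--         low = column.lower()
--         for i, token in enumerate(priority_tokens):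
--             if token in low:
--                 return i
--         return len(priority_tokens)
--
--     return min(pool, key=rank)
-- ===== Notes on version B (the rewrite author's own statement) =====
-- stated objective: alternative
-- what changed: Replaces A's nested token-by-token scan over the pool with a per-column rank function (first matching priority-token index, or 10) and a single min(pool, key=rank), relying on min's first-wins tie-break to reproduce both the priority order and the column-order and fallback behaviour.
import Mathlib
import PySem

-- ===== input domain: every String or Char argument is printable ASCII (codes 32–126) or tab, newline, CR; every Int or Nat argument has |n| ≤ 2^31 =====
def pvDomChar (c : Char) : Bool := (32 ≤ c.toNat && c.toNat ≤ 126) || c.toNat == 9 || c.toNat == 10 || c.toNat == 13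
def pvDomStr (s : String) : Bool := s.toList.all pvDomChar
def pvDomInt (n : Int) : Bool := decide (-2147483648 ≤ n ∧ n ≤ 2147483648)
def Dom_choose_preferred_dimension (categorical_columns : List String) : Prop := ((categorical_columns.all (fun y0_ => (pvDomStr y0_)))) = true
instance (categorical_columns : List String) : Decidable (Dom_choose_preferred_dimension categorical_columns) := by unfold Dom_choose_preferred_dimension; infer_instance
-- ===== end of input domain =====

-- B replaces A's nested priority-token/column scan by a per-column rank + first-wins min (alternative decomposition, same cost).

-- ===== PORT A =====
def pvTokens : List String :=
  ["region", "category", "segment", "product", "channel",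
   "language", "country", "market", "campaign", "status"]

def pvExcluded : List String := ["_id", "title"]

-- 'token in column.lower()'
def pvMatch (t c : String) : Bool := PySem.Str.isIn t (PySem.Str.lower c)

-- the 'for token in priority_tokens: for column in pool: if …: return column' double loop
def pvLoopA : List String → List String → Option String
  | [], _ => none
  | t :: ts, pool =>
    match pool.find? (fun c => pvMatch t c) with
    | some c => some c
    | none => pvLoopA ts pool

def choose_preferred_dimension (categorical_columns : List String) : String :=
  let preferred_pool :=
    categorical_columns.filter (fun c => !(pvExcluded.any (fun t => pvMatch t c)))
  let preferred_pool := if preferred_pool.isEmpty then categorical_columns else preferred_pool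
  match pvLoopA pvTokens preferred_pool with
  | some c => c
  | none =>
    match preferred_pool with
    | [] => "segment"
    | c :: _ => c

-- ===== PORT B =====
-- rank's loop over enumerate(priority_tokens)
def pvRankGo (i : Nat) : List String → String → Nat
  | [], _ => i
  | t :: ts, low => if PySem.Str.isIn t low then i else pvRankGo (i + 1) ts low

def pvRank (c : String) : Nat := pvRankGo 0 pvTokens (PySem.Str.lower c)

-- Python's min(pool, key=rank): first element of minimal rank wins
def pvMinBy (f : String → Nat) (acc : String) : List String → String
  | [] => acc
  | x :: xs => pvMinBy f (if f x < f acc then x else acc) xs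

def choose_preferred_dimension_alt (categorical_columns : List String) : String :=
  let pool :=
    categorical_columns.filter (fun c => !(pvExcluded.any (fun t => pvMatch t c)))
  let pool := if pool.isEmpty then categorical_columns else pool
  match pool with
  | [] => "segment"
  | c :: rest => pvMinBy pvRank c rest

-- ===== PRECONDITION & SPEC =====
def Spec_choose_preferred_dimension (categorical_columns : List String) (out : String) : Prop := out = choose_preferred_dimension_alt categorical_columns
instance (categorical_columns : List String) (out : String) : Decidable (Spec_choose_preferred_dimension categorical_columns out) := by unfold Spec_choose_preferred_dimension; infer_instance

-- ===== CLAIM (what is proved, stated in full; the proofs are below) =====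
def Claim_equal_choose_preferred_dimension : Prop := ∀ (categorical_columns : List String), Dom_choose_preferred_dimension categorical_columns → Spec_choose_preferred_dimension categorical_columns (choose_preferred_dimension categorical_columns)

-- ===== LEMMAS AND PROOFS =====

theorem pvRankGo_shift (i : Nat) (ts : List String) (low : String) :
    pvRankGo i ts low = i + pvRankGo 0 ts low := by
  induction ts generalizing i with
  | nil => simp [pvRankGo]
  | cons t ts ih =>
    simp only [pvRankGo]
    by_cases h : PySem.Str.isIn t low = true
    · rw [if_pos h, if_pos h]; omega
    · rw [if_neg h, if_neg h, ih (i + 1), ih 1]; omega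

theorem pvMinBy_acc_zero (f : String → Nat) (acc : String) (xs : List String)
    (h : f acc = 0) : pvMinBy f acc xs = acc := by
  induction xs with
  | nil => rfl
  | cons x xs ih => simp [pvMinBy, h, ih]

theorem pvMinBy_first_zero (f : String → Nat) (acc : String) (xs : List String) (c : String)
    (hacc : f acc ≠ 0) (h : xs.find? (fun x => f x == 0) = some c) :
    pvMinBy f acc xs = c := by
  induction xs generalizing acc with
  | nil => simp at h
  | cons x xs ih =>
    by_cases hx : f x = 0
    · have hc : x = c := by
        rw [List.find?_cons_of_pos (by simp [hx])] at h
        exact Option.some.inj h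
      subst hc
      simp only [pvMinBy]
      rw [if_pos (by omega)]
      exact pvMinBy_acc_zero f x xs hx
    · have h' : xs.find? (fun x => f x == 0) = some c := by
        rwa [List.find?_cons_of_neg (by simp [hx])] at h
      simp only [pvMinBy]
      by_cases hlt : f x < f acc
      · rw [if_pos hlt]; exact ih x hx h'
      · rw [if_neg hlt]; exact ih acc hacc h'

theorem pvMinBy_congr (f g : String → Nat) (acc : String) (xs : List String)
    (h : ∀ x ∈ acc :: xs, f x = g x) : pvMinBy f acc xs = pvMinBy g acc xs := by
  induction xs generalizing acc with
  | nil => rfl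
  | cons x xs ih =>
    have hacc : f acc = g acc := h acc (by simp)
    have hx : f x = g x := h x (by simp)
    simp only [pvMinBy]
    rw [show (if f x < f acc then x else acc) = (if g x < g acc then x else acc) by
      rw [hx, hacc]]
    refine ih _ ?_
    intro y hy
    rcases List.mem_cons.mp hy with hy | hy
    · split at hy <;> (subst hy; first | exact hx | exact hacc)
    · exact h y (by simp [hy])

theorem pvMinBy_shift (f : String → Nat) (acc : String) (xs : List String) :
    pvMinBy (fun x => 1 + f x) acc xs = pvMinBy f acc xs := by
  induction xs generalizing acc with
  | nil => rfl
  | cons x xs ih =>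
    simp only [pvMinBy]
    by_cases hl : f x < f acc
    · rw [if_pos hl, if_pos (by omega)]; exact ih _
    · rw [if_neg hl, if_neg (by omega)]; exact ih _

theorem pvLoopA_nil (ts : List String) : pvLoopA ts [] = none := by
  induction ts with
  | nil => rfl
  | cons t ts ih => simp [pvLoopA, ih]

theorem pv_main (ts : List String) (c : String) (rest : List String) :
    (match pvLoopA ts (c :: rest) with
     | some x => x
     | none => c) =
    pvMinBy (fun x => pvRankGo 0 ts (PySem.Str.lower x)) c rest := by
  induction ts generalizing c rest with
  | nil =>
    simp [pvLoopA]
    exact (pvMinBy_acc_zero _ c rest rfl).symm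
  | cons t ts ih =>
    have hrank : ∀ x, pvRankGo 0 (t :: ts) (PySem.Str.lower x) =
        if pvMatch t x then 0 else 1 + pvRankGo 0 ts (PySem.Str.lower x) := by
      intro x
      simp only [pvRankGo, pvMatch]
      by_cases h : PySem.Str.isIn t (PySem.Str.lower x) = true
      · rw [if_pos h, if_pos h]
      · rw [if_neg h, if_neg h, pvRankGo_shift 1]
    cases hf : (c :: rest).find? (fun x => pvMatch t x) with
    | some w =>
      have hf' : (c :: rest).find? (fun x => pvRankGo 0 (t :: ts) (PySem.Str.lower x) == 0)
          = some w := by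
        rw [show (fun x => pvRankGo 0 (t :: ts) (PySem.Str.lower x) == 0)
            = (fun x => pvMatch t x) from ?_]
        · exact hf
        · funext x
          by_cases h : pvMatch t x <;> simp [hrank x, h]
      simp only [pvLoopA, hf]
      by_cases hmc : pvMatch t c = true
      · have hw : w = c := by
          rw [List.find?_cons_of_pos hmc] at hf
          exact (Option.some.inj hf).symm
        have hc0 : pvRankGo 0 (t :: ts) (PySem.Str.lower c) = 0 := by
          rw [hrank c, if_pos hmc]
        subst hw
        exact (pvMinBy_acc_zero _ w rest hc0).symm
      · have hcne : pvRankGo 0 (t :: ts) (PySem.Str.lower c) ≠ 0 := by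
          rw [hrank c, if_neg (by simpa using hmc)]; omega
        have hrest : rest.find? (fun x => pvRankGo 0 (t :: ts) (PySem.Str.lower x) == 0)
            = some w := by
          rwa [List.find?_cons_of_neg (by simpa using hcne)] at hf'
        exact (pvMinBy_first_zero _ c rest w hcne hrest).symm
    | none =>
      have hnone : ∀ x ∈ c :: rest, pvMatch t x = false := by
        intro x hx
        simpa using List.find?_eq_none.mp hf x hx
      have hcongr : ∀ x ∈ c :: rest,
          pvRankGo 0 (t :: ts) (PySem.Str.lower x) = 1 + pvRankGo 0 ts (PySem.Str.lower x) := by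
        intro x hx
        rw [hrank x, if_neg (by simp [hnone x hx])]
      simp only [pvLoopA, hf]
      rw [ih c rest, ← pvMinBy_shift (fun x => pvRankGo 0 ts (PySem.Str.lower x)) c rest]
      exact (pvMinBy_congr _ _ c rest hcongr).symm

-- ===== VERDICT (by name: the statement is the Claim_ definition above) =====
theorem choose_preferred_dimension_spec : Claim_equal_choose_preferred_dimension := by
  intro cols _
  unfold Spec_choose_preferred_dimension choose_preferred_dimension choose_preferred_dimension_alt
  simp only []
  set pool := if (cols.filter (fun c => !(pvExcluded.any (fun t => pvMatch t c)))).isEmpty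
      then cols
      else cols.filter (fun c => !(pvExcluded.any (fun t => pvMatch t c))) with hpool
  cases pool with
  | nil => simp [pvLoopA_nil]
  | cons c rest => exact pv_main pvTokens c rest
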